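-- pv_equiv track=rewrite | github.com/scottolmer/nfl-betting-system | scripts/calibration/comprehensive_analysis.py | analyze_over_under_bias
-- ===== SOURCE A (Python) =====
-- from collections import defaultdict
-- from typing import Dict, List, Tuple
--
-- def analyze_over_under_bias(results: List[dict]) -> Dict:
--     """Analyze over vs under performance."""
--     bias = {
--         'OVER': {'wins': 0, 'losses': 0},
--         'UNDER': {'wins': 0, 'losses': 0}
--     }
--
--     by_stat = defaultdict(lambda: {
--         'OVER': {'wins': 0, 'losses': 0},
--         'UNDER': {'wins': 0, 'losses': 0}
--     })
--
--     for r in results: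
--         bet_type = r.get('bet_type', '').upper()
--         result = r.get('result', '').upper()
--         stat_type = r.get('stat_type', 'Unknown')
--
--         if bet_type in ('OVER', 'UNDER') and result in ('WIN', 'LOSS'):
--             if result == 'WIN':
--                 bias[bet_type]['wins'] += 1
--                 by_stat[stat_type][bet_type]['wins'] += 1
--             else:
--                 bias[bet_type]['losses'] += 1
--                 by_stat[stat_type][bet_type]['losses'] += 1
--
--     return {'overall': bias, 'by_stat': dict(by_stat)}
-- ===== SOURCE B (Python) =====
-- def analyze_over_under_bias(results):
--     """Analyze over vs under performance."""
--     # Stage 1: normalize every row into an event triple, then keep only valid bets.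
--     events = [(r.get('stat_type', 'Unknown'),
--                r.get('bet_type', '').upper(),
--                r.get('result', '').upper())
--               for r in results]
--     events = [e for e in events
--               if e[1] in ('OVER', 'UNDER') and e[2] in ('WIN', 'LOSS')]
--
--     # Stage 2: counts are answered by declarative queries over the event list.
--     def cell(evs):
--         return {b: {'wins': sum(1 for _, bb, rr in evs if bb == b and rr == 'WIN'),
--                     'losses': sum(1 for _, bb, rr in evs if bb == b and rr == 'LOSS')}
--                 for b in ('OVER', 'UNDER')}
--
--     seen = []
--     for s, _, _ in events:
--         if s not in seen:
--             seen.append(s)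
--     by_stat = {s: cell([e for e in events if e[0] == s]) for s in seen}
--     return {'overall': cell(events), 'by_stat': by_stat}
-- ===== Notes on version B (the rewrite author's own statement) =====
-- stated objective: alternative
-- what changed: A keeps running tallies in a mutable nested dict updated per row; B first materializes a normalized, filtered event list and then answers every wins/losses figure by independent count queries (generator-sum scans) over that list (overall and per first-seen stat), so there is no accumulator at all.
import Mathlib
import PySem

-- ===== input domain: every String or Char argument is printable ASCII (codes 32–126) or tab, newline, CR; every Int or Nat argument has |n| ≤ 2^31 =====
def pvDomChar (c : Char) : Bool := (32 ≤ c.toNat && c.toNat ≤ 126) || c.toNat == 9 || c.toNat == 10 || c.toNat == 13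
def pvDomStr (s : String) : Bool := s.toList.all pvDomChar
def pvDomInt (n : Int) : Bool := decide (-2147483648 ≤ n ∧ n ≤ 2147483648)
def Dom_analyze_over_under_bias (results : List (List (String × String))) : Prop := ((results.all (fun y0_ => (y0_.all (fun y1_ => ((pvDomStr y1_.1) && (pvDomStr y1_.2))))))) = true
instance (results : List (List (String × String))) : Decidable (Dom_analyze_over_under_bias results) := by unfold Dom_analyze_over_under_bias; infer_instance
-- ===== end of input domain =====

-- B replaces A's single mutating pass over a nested dict-of-dicts by a staged pipeline:
-- normalize rows to event triples, filter, then answer each wins/losses figure by an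
-- independent count query over the event list (objective: alternative, no accumulator).
-- Under the type convention the depth-4 'by_stat' value {stat: {OVER: {wins,losses}, UNDER: …}}
-- cannot be expressed in the declared return type, so BOTH ports render each per-stat record
-- with the flattened keys "OVER.wins"/"OVER.losses"/"UNDER.wins"/"UNDER.losses".

-- ===== PORT A =====
-- r.get(k, dflt) on the row dict
def pvAGet (r : List (String × String)) (k dflt : String) : String :=
  (PySem.Dict.mk r).getD k dflt

-- per-stat record (overWins, overLosses, underWins, underLosses) stands for A's nested
-- {'OVER': {'wins','losses'}, 'UNDER': {'wins','losses'}} dict whose keys are fixed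
def pvAStep (st : (Int × Int × Int × Int) × PySem.Dict String (Int × Int × Int × Int))
    (r : List (String × String)) :
    (Int × Int × Int × Int) × PySem.Dict String (Int × Int × Int × Int) :=
  let bt := PySem.Str.upper (pvAGet r "bet_type" "")
  let res := PySem.Str.upper (pvAGet r "result" "")
  let stt := pvAGet r "stat_type" "Unknown"
  if (bt == "OVER" || bt == "UNDER") && (res == "WIN" || res == "LOSS") then
    let b := st.1
    let b' :=
      if res == "WIN" then
        (if bt == "OVER" then (b.1 + 1, b.2.1, b.2.2.1, b.2.2.2)
         else (b.1, b.2.1, b.2.2.1 + 1, b.2.2.2))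
      else
        (if bt == "OVER" then (b.1, b.2.1 + 1, b.2.2.1, b.2.2.2)
         else (b.1, b.2.1, b.2.2.1, b.2.2.2 + 1))
    let bys' := st.2.modify stt (0, 0, 0, 0) (fun q =>
      if res == "WIN" then
        (if bt == "OVER" then (q.1 + 1, q.2.1, q.2.2.1, q.2.2.2)
         else (q.1, q.2.1, q.2.2.1 + 1, q.2.2.2))
      else
        (if bt == "OVER" then (q.1, q.2.1 + 1, q.2.2.1, q.2.2.2)
         else (q.1, q.2.1, q.2.2.1, q.2.2.2 + 1)))
    (b', bys')
  else st

-- flattened rendering of one per-stat record (see header note)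
def pvAFlat (q : Int × Int × Int × Int) : List (String × Int) :=
  [("OVER.wins", q.1), ("OVER.losses", q.2.1), ("UNDER.wins", q.2.2.1), ("UNDER.losses", q.2.2.2)]

def analyze_over_under_bias (results : List (List (String × String))) :
    List (String × List (String × List (String × Int))) :=
  let fin := results.foldl pvAStep ((0, 0, 0, 0), PySem.Dict.empty)
  let b := fin.1
  [("overall",
    [("OVER", [("wins", b.1), ("losses", b.2.1)]),
     ("UNDER", [("wins", b.2.2.1), ("losses", b.2.2.2)])]),
   ("by_stat", fin.2.items.map (fun p => (p.1, pvAFlat p.2)))]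

-- ===== PORT B =====
-- stage 1a: normalize a row into an event triple (stat_type, BET_TYPE, RESULT)
def pvEv (r : List (String × String)) : String × String × String :=
  ((PySem.Dict.mk r).getD "stat_type" "Unknown",
   PySem.Str.upper ((PySem.Dict.mk r).getD "bet_type" ""),
   PySem.Str.upper ((PySem.Dict.mk r).getD "result" ""))

-- stage 1b: the validity filter e[1] in ('OVER','UNDER') and e[2] in ('WIN','LOSS')
def pvGuard (e : String × String × String) : Bool :=
  (e.2.1 == "OVER" || e.2.1 == "UNDER") && (e.2.2 == "WIN" || e.2.2 == "LOSS")

-- one count query: sum(1 for _, bb, rr in evs if bb == b and rr == r)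
def pvCount (evs : List (String × String × String)) (b r : String) : Int :=
  (evs.countP (fun e => e.2.1 == b && e.2.2 == r) : Int)

-- the OVER/UNDER × wins/losses skeleton answered by count queries ('cell' in Source B), nested form
def pvBCell (evs : List (String × String × String)) : List (String × List (String × Int)) :=
  [("OVER", [("wins", pvCount evs "OVER" "WIN"), ("losses", pvCount evs "OVER" "LOSS")]),
   ("UNDER", [("wins", pvCount evs "UNDER" "WIN"), ("losses", pvCount evs "UNDER" "LOSS")])]

-- the same skeleton in the flattened per-stat rendering (see header note)
def pvBFlat (evs : List (String × String × String)) : List (String × Int) :=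
  [("OVER.wins", pvCount evs "OVER" "WIN"), ("OVER.losses", pvCount evs "OVER" "LOSS"),
   ("UNDER.wins", pvCount evs "UNDER" "WIN"), ("UNDER.losses", pvCount evs "UNDER" "LOSS")]

def analyze_over_under_bias_alt (results : List (List (String × String))) :
    List (String × List (String × List (String × Int))) :=
  let evs := (results.map pvEv).filter pvGuard
  let seen := evs.foldl (fun acc e => if e.1 ∈ acc then acc else acc ++ [e.1]) []
  [("overall", pvBCell evs),
   ("by_stat", seen.map (fun s => (s, pvBFlat (evs.filter (fun e => e.1 == s)))))]

-- ===== PRECONDITION & SPEC =====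
def Spec_analyze_over_under_bias (results : List (List (String × String))) (out : List (String × List (String × List (String × Int)))) : Prop := out = analyze_over_under_bias_alt results
instance (results : List (List (String × String))) (out : List (String × List (String × List (String × Int)))) : Decidable (Spec_analyze_over_under_bias results out) := by unfold Spec_analyze_over_under_bias; infer_instance

-- ===== CLAIM (what is proved, stated in full; the proofs are below) =====
def Claim_equal_analyze_over_under_bias : Prop := ∀ (results : List (List (String × String))), Dom_analyze_over_under_bias results → Spec_analyze_over_under_bias results (analyze_over_under_bias results)

-- ===== LEMMAS AND PROOFS =====

-- proof-side intermediate: a counting fold whose state mirrors B's count queries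
def pvCStep
    (st : PySem.Dict (String × String) Int × PySem.Dict (String × String × String) Int × List String)
    (r : List (String × String)) :
    PySem.Dict (String × String) Int × PySem.Dict (String × String × String) Int × List String :=
  let e := pvEv r
  if pvGuard e then
    (st.1.modify (e.2.1, e.2.2) 0 (· + 1),
     st.2.1.modify e 0 (· + 1),
     if e.1 ∈ st.2.2 then st.2.2 else st.2.2 ++ [e.1])
  else st

-- invariant tying A's fold state to the counting fold's state
def pvInv (a : (Int × Int × Int × Int) × PySem.Dict String (Int × Int × Int × Int))
    (b : PySem.Dict (String × String) Int × PySem.Dict (String × String × String) Int × List String) :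
    Prop :=
  a.1.1 = b.1.getD ("OVER", "WIN") 0 ∧
  a.1.2.1 = b.1.getD ("OVER", "LOSS") 0 ∧
  a.1.2.2.1 = b.1.getD ("UNDER", "WIN") 0 ∧
  a.1.2.2.2 = b.1.getD ("UNDER", "LOSS") 0 ∧
  a.2.keys = b.2.2 ∧
  a.2.keys.Nodup ∧
  ∀ s, a.2.getD s (0, 0, 0, 0) =
    (b.2.1.getD (s, "OVER", "WIN") 0, b.2.1.getD (s, "OVER", "LOSS") 0,
     b.2.1.getD (s, "UNDER", "WIN") 0, b.2.1.getD (s, "UNDER", "LOSS") 0)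

theorem pvInv_step (a : (Int × Int × Int × Int) × PySem.Dict String (Int × Int × Int × Int))
    (b : PySem.Dict (String × String) Int × PySem.Dict (String × String × String) Int × List String)
    (r : List (String × String)) (h : pvInv a b) : pvInv (pvAStep a r) (pvCStep b r) := by
  obtain ⟨h1, h2, h3, h4, hk, hnd, hs⟩ := h
  unfold pvAStep pvCStep pvEv pvGuard pvAGet
  set bt := PySem.Str.upper ((PySem.Dict.mk r).getD "bet_type" "") with hbt
  set res := PySem.Str.upper ((PySem.Dict.mk r).getD "result" "") with hres
  set stt := (PySem.Dict.mk r).getD "stat_type" "Unknown" with hstt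
  by_cases hg : ((bt == "OVER" || bt == "UNDER") && (res == "WIN" || res == "LOSS")) = true
  · simp only [hg, if_true]
    simp only [Bool.and_eq_true, Bool.or_eq_true, beq_iff_eq] at hg
    obtain ⟨hb, hr⟩ := hg
    have hkeys : (a.2.modify stt ((0 : Int), (0 : Int), (0 : Int), (0 : Int)) (fun q =>
        if res == "WIN" then
          (if bt == "OVER" then (q.1 + 1, q.2.1, q.2.2.1, q.2.2.2)
           else (q.1, q.2.1, q.2.2.1 + 1, q.2.2.2))
        else
          (if bt == "OVER" then (q.1, q.2.1 + 1, q.2.2.1, q.2.2.2)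
           else (q.1, q.2.1, q.2.2.1, q.2.2.2 + 1)))).keys =
        if stt ∈ b.2.2 then a.2.keys else a.2.keys ++ [stt] := by
      rw [PySem.Dict.keys_modify]
      by_cases hc : a.2.contains stt = true
      · rw [PySem.Dict.keys_insert_of_contains _ _ hc,
          if_pos (hk ▸ (PySem.Dict.contains_iff_mem_keys _ _).mp hc)]
      · rw [PySem.Dict.keys_insert_of_not_contains _ _ (by simpa using hc),
          if_neg (by
            intro hmem
            exact hc ((PySem.Dict.contains_iff_mem_keys _ _).mpr (hk ▸ hmem)))]
    refine ⟨?_, ?_, ?_, ?_, ?_, ?_, ?_⟩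
    · rcases hb with hb | hb <;> rcases hr with hr | hr <;>
        simp [hb, hr, PySem.Dict.getD_modify, h1]
    · rcases hb with hb | hb <;> rcases hr with hr | hr <;>
        simp [hb, hr, PySem.Dict.getD_modify, h2]
    · rcases hb with hb | hb <;> rcases hr with hr | hr <;>
        simp [hb, hr, PySem.Dict.getD_modify, h3]
    · rcases hb with hb | hb <;> rcases hr with hr | hr <;>
        simp [hb, hr, PySem.Dict.getD_modify, h4]
    · rw [hkeys]
      split
      · exact hk
      · rw [hk]
    · rw [hkeys]
      split
      · exact hnd
      · rename_i hmem
        rw [List.nodup_append]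
        refine ⟨hnd, List.nodup_singleton _, ?_⟩
        intro x hx y hy
        rw [List.mem_singleton] at hy
        subst hy
        exact fun hxy => hmem (hk ▸ (hxy ▸ hx))
    · intro s
      by_cases hseq : s = stt
      · rw [hseq, PySem.Dict.getD_modify_self]
        rcases hb with hb | hb <;> rcases hr with hr | hr <;>
          simp [hb, hr, PySem.Dict.getD_modify, hs stt, Prod.ext_iff]
      · rw [PySem.Dict.getD_modify_of_ne _ _ _ hseq]
        have hne : ∀ (x y : String), (s, x, y) ≠ (stt, bt, res) := by
          intro x y hcon
          exact hseq (congrArg Prod.fst hcon)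
        rw [hs s]
        rw [PySem.Dict.getD_modify_of_ne _ _ _ (hne _ _),
          PySem.Dict.getD_modify_of_ne _ _ _ (hne _ _),
          PySem.Dict.getD_modify_of_ne _ _ _ (hne _ _),
          PySem.Dict.getD_modify_of_ne _ _ _ (hne _ _)]
  · simp only [eq_false_of_ne_true hg]
    rw [if_neg (by simp)]
    exact ⟨h1, h2, h3, h4, hk, hnd, hs⟩

theorem pvInv_fold (results : List (List (String × String)))
    (a : (Int × Int × Int × Int) × PySem.Dict String (Int × Int × Int × Int))
    (b : PySem.Dict (String × String) Int × PySem.Dict (String × String × String) Int × List String)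
    (h : pvInv a b) : pvInv (results.foldl pvAStep a) (results.foldl pvCStep b) := by
  induction results generalizing a b with
  | nil => exact h
  | cons r rs ih => exact ih _ _ (pvInv_step a b r h)

-- the counting fold, read off as pure functions of the filtered event list
theorem pvC_eq (results : List (List (String × String)))
    (st : PySem.Dict (String × String) Int × PySem.Dict (String × String × String) Int × List String) :
    results.foldl pvCStep st =
      (((results.map pvEv).filter pvGuard).foldl (fun d e => d.modify (e.2.1, e.2.2) 0 (· + 1)) st.1,
       ((results.map pvEv).filter pvGuard).foldl (fun d e => d.modify e 0 (· + 1)) st.2.1,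
       ((results.map pvEv).filter pvGuard).foldl
         (fun acc e => if e.1 ∈ acc then acc else acc ++ [e.1]) st.2.2) := by
  induction results generalizing st with
  | nil => rfl
  | cons r rs ih =>
    simp only [List.map_cons, List.filter_cons]
    by_cases hg : pvGuard (pvEv r) = true
    · simp only [hg, if_true, List.foldl_cons, pvCStep]
      exact ih _
    · simp only [eq_false_of_ne_true hg, List.foldl_cons, pvCStep, Bool.false_eq_true,
        if_false]
      exact ih _

-- a Counter fold keyed through f, read as a countP over the list
theorem pvGetD_counter_foldl {α κ : Type} [BEq κ] [LawfulBEq κ]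
    (l : List α) (f : α → κ) (d : PySem.Dict κ Int) (k : κ) :
    (l.foldl (fun d x => d.modify (f x) 0 (· + 1)) d).getD k 0 =
      d.getD k 0 + (l.countP (fun x => f x == k) : Int) := by
  induction l generalizing d with
  | nil => simp
  | cons x xs ih =>
    rw [List.foldl_cons, ih, List.countP_cons]
    by_cases hx : f x = k
    · rw [hx, PySem.Dict.getD_modify_self]
      simp
      ring
    · rw [PySem.Dict.getD_modify_of_ne _ _ _ (Ne.symm hx)]
      simp [hx]

-- ===== VERDICT (by name: the statement is the Claim_ definition above) =====
theorem analyze_over_under_bias_spec : Claim_equal_analyze_over_under_bias := by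
  intro results _
  unfold Spec_analyze_over_under_bias analyze_over_under_bias analyze_over_under_bias_alt
  have h := pvInv_fold results ((0, 0, 0, 0), PySem.Dict.empty) (PySem.Dict.empty, PySem.Dict.empty, [])
    ⟨rfl, rfl, rfl, rfl, rfl, List.nodup_nil, fun _ => rfl⟩
  rw [pvC_eq] at h
  obtain ⟨h1, h2, h3, h4, hk, hnd, hs⟩ := h
  set evs := (results.map pvEv).filter pvGuard with hevs
  have hov : ∀ b r, (evs.foldl (fun d e => d.modify (e.2.1, e.2.2) 0 (· + 1))
      (PySem.Dict.empty : PySem.Dict (String × String) Int)).getD (b, r) 0 = pvCount evs b r := by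
    intro b r
    rw [pvGetD_counter_foldl evs (fun e => (e.2.1, e.2.2)) PySem.Dict.empty (b, r)]
    simp only [pvCount, PySem.Dict.getD_empty, zero_add, Int.natCast_inj]
    apply List.countP_congr
    intro e _
    rcases e with ⟨s', b', r'⟩
    simp [Prod.ext_iff]
  have hst : ∀ s b r, (evs.foldl (fun d e => d.modify e 0 (· + 1))
      (PySem.Dict.empty : PySem.Dict (String × String × String) Int)).getD (s, b, r) 0 =
      pvCount (evs.filter (fun e => e.1 == s)) b r := by
    intro s b r
    refine Eq.trans (pvGetD_counter_foldl evs (fun e => e) PySem.Dict.empty (s, b, r)) ?_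
    simp only [pvCount, List.countP_filter, PySem.Dict.getD_empty, zero_add, Int.natCast_inj]
    apply List.countP_congr
    intro e _
    rcases e with ⟨s', b', r'⟩
    simp [Prod.ext_iff]
    tauto
  simp only [pvBCell, pvBFlat, h1, h2, h3, h4, hov,
    PySem.Dict.items_eq_map_keys _ hnd ((0 : Int), (0 : Int), (0 : Int), (0 : Int)),
    List.map_map, hk]
  apply List.cons_eq_cons.mpr
  refine ⟨rfl, ?_⟩
  apply List.cons_eq_cons.mpr
  refine ⟨?_, rfl⟩
  refine congrArg (Prod.mk "by_stat") ?_
  refine List.map_congr_left ?_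
  intro s _
  simp only [Function.comp_apply, pvAFlat, hs s, hst]
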